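-- pv_equiv track=rewrite | github.com/fenrir-create/conf_dz_4 | readbin.py | decode_instructions
-- ===== SOURCE A (Python) =====
-- def decode_instructions(instructions):
--     decoded = []
--     for instr in instructions:
--         # Извлекаем opcode
--         opcode = (instr >> 26) & 0x3F  # opcode занимает старшие 6 бит
--         if opcode == 26:  # LOAD_CONST
--             B = (instr >> 12) & 0xFFF  # 12 бит для B
--             C = instr & 0xFFF          # 12 бит для C
--             decoded.append(f"LOAD_CONST B={B}, C={C}")
--         elif opcode == 14:  # READ_MEM
--             B = (instr >> 5) & 0x7FF    # 11 бит для B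
--             C = instr & 0x1FFFFF       # 21 бит для C
--             decoded.append(f"READ_MEM B={B}, C={C}")
--         elif opcode == 7:  # WRITE_MEM
--             B = (instr >> 11) & 0x3F    # 6 бит для B
--             C = (instr >> 5) & 0x3F     # 6 бит для C
--             D = instr & 0x3F           # 6 бит для D
--             decoded.append(f"WRITE_MEM B={B}, C={C}, D={D}")
--         elif opcode == 6:  # UNARY_ABS
--             B = (instr >> 12) & 0xFFF   # 12 бит для B
--             C = instr & 0x7F           # 7 бит для C
--             decoded.append(f"UNARY_ABS B={B}, C={C}")
--         else:
--             decoded.append(f"UNKNOWN_OPCODE {opcode}")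
--
--     return decoded
-- ===== SOURCE B (Python) =====
-- # Each opcode maps to its mnemonic and field specs as (name, lo, hi) bit ranges
-- # over an explicit LSB-first 32-bit vector of the instruction word.
-- SPECS = {
--     26: ("LOAD_CONST", (("B", 12, 24), ("C", 0, 12))),
--     14: ("READ_MEM",  (("B", 5, 16), ("C", 0, 21))),
--     7:  ("WRITE_MEM", (("B", 11, 17), ("C", 5, 11), ("D", 0, 6))),
--     6:  ("UNARY_ABS", (("B", 12, 24), ("C", 0, 7))),
-- }
--
--
-- def _bits32(instr):
--     """LSB-first list of the 32 low bits of instr (two's complement), by repeated divmod."""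
--     m = instr % 4294967296
--     bits = []
--     for _ in range(32):
--         bits.append(m % 2)
--         m //= 2
--     return bits
--
--
-- def _field(bits, lo, hi):
--     """Value of bit range [lo, hi) reassembled by Horner evaluation (MSB first)."""
--     v = 0
--     for b in reversed(bits[lo:hi]):
--         v = 2 * v + b
--     return v
--
--
-- def decode_instructions(instructions):
--     decoded = []
--     for instr in instructions:
--         bits = _bits32(instr)
--         opcode = _field(bits, 26, 32)
--         entry = SPECS.get(opcode)
--         if entry is None:
--             decoded.append(f"UNKNOWN_OPCODE {opcode}")
--         else:
--             name, fields = entry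
--             decoded.append(name + " " + ", ".join(f"{n}={_field(bits, lo, hi)}" for n, lo, hi in fields))
--     return decoded
-- ===== Notes on version B (the rewrite author's own statement) =====
-- stated objective: alternative
-- what changed: Instead of extracting each field with per-opcode shift-and-mask expressions in an elif chain, B explodes each instruction's 32 low bits into an explicit LSB-first bit vector by repeated divmod and reassembles opcode and fields by Horner evaluation over slices of that vector, driven by a spec table of (name, lo, hi) bit ranges.
import Mathlib
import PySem

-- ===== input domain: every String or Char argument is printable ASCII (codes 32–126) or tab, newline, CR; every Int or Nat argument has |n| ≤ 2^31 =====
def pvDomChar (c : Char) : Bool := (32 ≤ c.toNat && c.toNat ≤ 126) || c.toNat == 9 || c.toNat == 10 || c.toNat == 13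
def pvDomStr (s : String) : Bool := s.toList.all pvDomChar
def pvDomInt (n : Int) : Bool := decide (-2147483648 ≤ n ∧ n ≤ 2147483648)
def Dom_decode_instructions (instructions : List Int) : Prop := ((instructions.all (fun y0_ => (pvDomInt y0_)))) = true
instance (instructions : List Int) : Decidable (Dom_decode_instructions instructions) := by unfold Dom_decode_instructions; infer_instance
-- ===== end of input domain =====

-- B replaces A's per-opcode shift-and-mask elif chain by exploding each instruction's 32 low bits
-- into an explicit LSB-first bit vector (repeated divmod) and reassembling opcode/fields by Horner
-- evaluation over slices of that vector, driven by a spec table (alternative; same cost).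


-- ===== PORT A =====
-- Python '>>' on int is Int '>>>', '&' is PySem.Int.band (exact on negatives)
def decode_instructions (instructions : List Int) : List String :=
  instructions.foldl (fun (decoded : List String) (instr : Int) =>
    let opcode := PySem.Int.band (instr >>> (26:Nat)) 0x3F
    if opcode = 26 then
      let B := PySem.Int.band (instr >>> (12:Nat)) 0xFFF
      let C := PySem.Int.band instr 0xFFF
      decoded ++ ["LOAD_CONST B=" ++ PySem.Int.toStr B ++ ", C=" ++ PySem.Int.toStr C]
    else if opcode = 14 then
      let B := PySem.Int.band (instr >>> (5:Nat)) 0x7FF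
      let C := PySem.Int.band instr 0x1FFFFF
      decoded ++ ["READ_MEM B=" ++ PySem.Int.toStr B ++ ", C=" ++ PySem.Int.toStr C]
    else if opcode = 7 then
      let B := PySem.Int.band (instr >>> (11:Nat)) 0x3F
      let C := PySem.Int.band (instr >>> (5:Nat)) 0x3F
      let D := PySem.Int.band instr 0x3F
      decoded ++ ["WRITE_MEM B=" ++ PySem.Int.toStr B ++ ", C=" ++ PySem.Int.toStr C ++ ", D=" ++ PySem.Int.toStr D]
    else if opcode = 6 then
      let B := PySem.Int.band (instr >>> (12:Nat)) 0xFFF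
      let C := PySem.Int.band instr 0x7F
      decoded ++ ["UNARY_ABS B=" ++ PySem.Int.toStr B ++ ", C=" ++ PySem.Int.toStr C]
    else
      decoded ++ ["UNKNOWN_OPCODE " ++ PySem.Int.toStr opcode]) []

-- ===== PORT B =====
-- _bits32: 'for _ in range(32): bits.append(m % 2); m //= 2' — the obvious structural recursion
-- on the loop counter, producing the same LSB-first list
def pvBits32go : Nat → Int → List Int
  | 0, _ => []
  | k+1, m => PySem.Int.mod m 2 :: pvBits32go k (PySem.Int.floordiv m 2)

def pvBits32 (instr : Int) : List Int := pvBits32go 32 (PySem.Int.mod instr 4294967296)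

-- _field: Horner fold over reversed(bits[lo:hi])
def pvField (bits : List Int) (lo hi : Int) : Int :=
  ((PySem.List.slice bits (some lo) (some hi)).reverse).foldl (fun v b => 2 * v + b) 0

-- SPECS: opcode -> (mnemonic, field specs (name, lo, hi))
def pvSpecs : List (Int × String × List (String × Int × Int)) :=
  [(26, ("LOAD_CONST", [("B", 12, 24), ("C", 0, 12)])),
   (14, ("READ_MEM",  [("B", 5, 16), ("C", 0, 21)])),
   (7,  ("WRITE_MEM", [("B", 11, 17), ("C", 5, 11), ("D", 0, 6)])),
   (6,  ("UNARY_ABS", [("B", 12, 24), ("C", 0, 7)]))]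

def decode_instructions_alt (instructions : List Int) : List String :=
  instructions.map (fun (instr : Int) =>
    let bits := pvBits32 instr
    let opcode := pvField bits 26 32
    match pvSpecs.lookup opcode with
    | none => "UNKNOWN_OPCODE " ++ PySem.Int.toStr opcode
    | some (name, fields) =>
        name ++ " " ++ PySem.Str.join ", "
          (fields.map (fun f => f.1 ++ "=" ++ PySem.Int.toStr (pvField bits f.2.1 f.2.2))))

-- ===== PRECONDITION & SPEC =====
def Spec_decode_instructions (instructions : List Int) (out : List String) : Prop := out = decode_instructions_alt instructions
instance (instructions : List Int) (out : List String) : Decidable (Spec_decode_instructions instructions out) := by unfold Spec_decode_instructions; infer_instance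

-- ===== CLAIM (what is proved, stated in full; the proofs are below) =====
def Claim_equal_decode_instructions : Prop := ∀ (instructions : List Int), Dom_decode_instructions instructions → Spec_decode_instructions instructions (decode_instructions instructions)

-- ===== LEMMAS AND PROOFS =====

-- per-element body of A's loop
def pvAone (instr : Int) : String :=
  let opcode := PySem.Int.band (instr >>> (26:Nat)) 0x3F
  if opcode = 26 then
    "LOAD_CONST B=" ++ PySem.Int.toStr (PySem.Int.band (instr >>> (12:Nat)) 0xFFF) ++ ", C=" ++ PySem.Int.toStr (PySem.Int.band instr 0xFFF)
  else if opcode = 14 then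
    "READ_MEM B=" ++ PySem.Int.toStr (PySem.Int.band (instr >>> (5:Nat)) 0x7FF) ++ ", C=" ++ PySem.Int.toStr (PySem.Int.band instr 0x1FFFFF)
  else if opcode = 7 then
    "WRITE_MEM B=" ++ PySem.Int.toStr (PySem.Int.band (instr >>> (11:Nat)) 0x3F) ++ ", C=" ++ PySem.Int.toStr (PySem.Int.band (instr >>> (5:Nat)) 0x3F) ++ ", D=" ++ PySem.Int.toStr (PySem.Int.band instr 0x3F)
  else if opcode = 6 then
    "UNARY_ABS B=" ++ PySem.Int.toStr (PySem.Int.band (instr >>> (12:Nat)) 0xFFF) ++ ", C=" ++ PySem.Int.toStr (PySem.Int.band instr 0x7F)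
  else
    "UNKNOWN_OPCODE " ++ PySem.Int.toStr opcode

lemma a_eq_map (l : List Int) (acc : List String) :
    l.foldl (fun (decoded : List String) (instr : Int) =>
      let opcode := PySem.Int.band (instr >>> (26:Nat)) 0x3F
      if opcode = 26 then
        let B := PySem.Int.band (instr >>> (12:Nat)) 0xFFF
        let C := PySem.Int.band instr 0xFFF
        decoded ++ ["LOAD_CONST B=" ++ PySem.Int.toStr B ++ ", C=" ++ PySem.Int.toStr C]
      else if opcode = 14 then
        let B := PySem.Int.band (instr >>> (5:Nat)) 0x7FF
        let C := PySem.Int.band instr 0x1FFFFF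
        decoded ++ ["READ_MEM B=" ++ PySem.Int.toStr B ++ ", C=" ++ PySem.Int.toStr C]
      else if opcode = 7 then
        let B := PySem.Int.band (instr >>> (11:Nat)) 0x3F
        let C := PySem.Int.band (instr >>> (5:Nat)) 0x3F
        let D := PySem.Int.band instr 0x3F
        decoded ++ ["WRITE_MEM B=" ++ PySem.Int.toStr B ++ ", C=" ++ PySem.Int.toStr C ++ ", D=" ++ PySem.Int.toStr D]
      else if opcode = 6 then
        let B := PySem.Int.band (instr >>> (12:Nat)) 0xFFF
        let C := PySem.Int.band instr 0x7F
        decoded ++ ["UNARY_ABS B=" ++ PySem.Int.toStr B ++ ", C=" ++ PySem.Int.toStr C]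
      else
        decoded ++ ["UNKNOWN_OPCODE " ++ PySem.Int.toStr opcode]) acc
    = acc ++ l.map pvAone := by
  induction l generalizing acc with
  | nil => simp
  | cons x xs ih =>
    simp only [List.foldl_cons, List.map_cons, ih, pvAone]
    split_ifs <;> simp

-- Nat-level bit list: pvBits32go on a nonnegative argument
def pvNatBits : Nat → Nat → List Nat
  | 0, _ => []
  | k+1, n => n % 2 :: pvNatBits k (n / 2)

lemma length_pvNatBits (k : Nat) : ∀ n, (pvNatBits k n).length = k := by
  induction k with
  | zero => intro n; rfl
  | succ k ih => intro n; simp [pvNatBits, ih]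

lemma pvNatBits_split (j k : Nat) : ∀ n, pvNatBits (j + k) n = pvNatBits j n ++ pvNatBits k (n / 2 ^ j) := by
  induction j with
  | zero => intro n; simp [pvNatBits]
  | succ j ih =>
    intro n
    have h : j + 1 + k = (j + k) + 1 := by omega
    rw [h]
    show pvNatBits ((j + k) + 1) n = _
    simp only [pvNatBits, ih (n / 2), List.cons_append]
    congr 2
    rw [Nat.div_div_eq_div_mul, pow_succ, mul_comm 2 (2 ^ j)]

lemma pvBits32go_natCast (k : Nat) : ∀ n : Nat, pvBits32go k ((n : Nat) : Int) = (pvNatBits k n).map (fun (b : Nat) => (b : Int)) := by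
  induction k with
  | zero => intro n; rfl
  | succ k ih =>
    intro n
    show PySem.Int.mod (n : Int) 2 :: pvBits32go k (PySem.Int.floordiv (n : Int) 2) = _
    rw [show (2 : Int) = ((2 : Nat) : Int) from rfl, PySem.Int.mod_natCast, PySem.Int.floordiv_natCast, ih]
    rfl

lemma pvHorner_natBits (w : Nat) : ∀ (n a : Nat),
    ((pvNatBits w n).reverse).foldl (fun v b => 2 * v + b) a = a * 2 ^ w + n % 2 ^ w := by
  induction w with
  | zero => intro n a; simp [pvNatBits]; omega
  | succ w ih =>
    intro n a
    show (((n % 2) :: pvNatBits w (n / 2)).reverse).foldl (fun v b => 2 * v + b) a = _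
    rw [List.reverse_cons, List.foldl_append, ih]
    show 2 * (a * 2 ^ w + n / 2 % 2 ^ w) + n % 2 = _
    rw [pow_succ', Nat.mod_mul]
    ring

lemma foldl_horner_cast (l : List Nat) : ∀ a : Nat,
    (l.map (fun (b : Nat) => (b : Int))).foldl (fun v b => 2 * v + b) ((a : Nat) : Int) = ((l.foldl (fun v b => 2 * v + b) a : Nat) : Int) := by
  induction l with
  | nil => intro a; rfl
  | cons x xs ih =>
    intro a
    rw [List.map_cons, List.foldl_cons, List.foldl_cons,
      show (2 * ((a : Nat) : Int) + ((x : Nat) : Int)) = (((2 * a + x : Nat) : Nat) : Int) by push_cast; ring, ih]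

lemma pvBits32_eq (x : Int) :
    pvBits32 x = (pvNatBits 32 (PySem.Int.mod x 4294967296).toNat).map (fun (b : Nat) => (b : Int)) := by
  have hpos : (0 : Int) < 4294967296 := by norm_num
  have h0 : (0 : Int) ≤ PySem.Int.mod x 4294967296 := PySem.Int.mod_nonneg x hpos
  have h1 : PySem.Int.mod x 4294967296 = (((PySem.Int.mod x 4294967296).toNat : Nat) : Int) := (Int.toNat_of_nonneg h0).symm
  conv_lhs => rw [pvBits32, h1, pvBits32go_natCast]

lemma pvField_spec (x : Int) (lo hi : Nat) (hlo : lo ≤ hi) (hhi : hi ≤ 32) :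
    pvField (pvBits32 x) ((lo : Nat) : Int) ((hi : Nat) : Int)
      = (((PySem.Int.mod x 4294967296).toNat / 2 ^ lo % 2 ^ (hi - lo) : Nat) : Int) := by
  rw [pvBits32_eq]
  set n := (PySem.Int.mod x 4294967296).toNat with hn
  have hsplit1 : pvNatBits 32 n = pvNatBits lo n ++ pvNatBits (32 - lo) (n / 2 ^ lo) := by
    have h := pvNatBits_split lo (32 - lo) n
    rwa [show lo + (32 - lo) = 32 from by omega] at h
  have hsplit2 : pvNatBits (32 - lo) (n / 2 ^ lo)
      = pvNatBits (hi - lo) (n / 2 ^ lo) ++ pvNatBits (32 - hi) (n / 2 ^ lo / 2 ^ (hi - lo)) := by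
    have h := pvNatBits_split (hi - lo) (32 - hi) (n / 2 ^ lo)
    rwa [show (hi - lo) + (32 - hi) = 32 - lo from by omega] at h
  have hmaps : ∀ (L : List Nat), (((L.map (fun (b : Nat) => (b : Int))).drop lo).take (hi - lo))
      = ((L.drop lo).take (hi - lo)).map (fun (b : Nat) => (b : Int)) := by
    intro L; simp
  rw [pvField, PySem.List.slice_natCast, hmaps, hsplit1,
    List.drop_left' (length_pvNatBits lo n), hsplit2,
    List.take_left' (length_pvNatBits (hi - lo) (n / 2 ^ lo)),
    ← List.map_reverse,
    show (0 : Int) = ((0 : Nat) : Int) from rfl,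
    foldl_horner_cast, pvHorner_natBits]
  simp

-- bridge instances: A's shift-and-mask field = Nat field of the low 32 bits
lemma pvBr_26_6 (x : Int) : PySem.Int.band (x >>> (26:Nat)) 63 = (((PySem.Int.mod x 4294967296).toNat / 67108864 % 64 : Nat) : Int) := by
  rw [PySem.Int.mod_eq_emod_of_pos (show (0:Int) < 4294967296 by norm_num)]
  cases x with
  | ofNat a =>
    have hs : (Int.ofNat a) >>> (26:Nat) = Int.ofNat (a >>> 26) := rfl
    rw [hs]
    have hb : PySem.Int.band (Int.ofNat (a >>> 26)) 63 = (((a >>> 26) &&& 63 : Nat) : Int) := by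
      unfold PySem.Int.band
      rw [if_pos (show (0:Int) ≤ Int.ofNat (a >>> 26) from Int.natCast_nonneg _),
        if_pos (by norm_num : (0:Int) ≤ 63)]
      rfl
    rw [hb, Nat.shiftRight_eq_div_pow,
      show (63 : Nat) = 2 ^ 6 - 1 from rfl, Nat.and_two_pow_sub_one_eq_mod]
    norm_num
    omega
  | negSucc m =>
    have hs : (Int.negSucc m) >>> (26:Nat) = Int.negSucc (m >>> 26) := rfl
    rw [hs]
    have hb : PySem.Int.band (Int.negSucc (m >>> 26)) 63 = (((63 - (63 &&& (m >>> 26)) : Nat) : Nat) : Int) := by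
      have h3 : (-Int.negSucc (m >>> 26) - (1:Int)).toNat = m >>> 26 := by
        rw [Int.negSucc_eq]; omega
      unfold PySem.Int.band
      have hneg : ¬ (0:Int) ≤ Int.negSucc (m >>> 26) := by rw [Int.negSucc_eq]; omega
      rw [if_neg hneg, if_pos (by norm_num : (0:Int) ≤ 63), h3]
      rfl
    rw [hb, Nat.and_comm, Nat.shiftRight_eq_div_pow,
      show (63 : Nat) = 2 ^ 6 - 1 from rfl, Nat.and_two_pow_sub_one_eq_mod, Int.negSucc_eq]
    norm_num
    omega


lemma pvBr_12_12 (x : Int) : PySem.Int.band (x >>> (12:Nat)) 4095 = (((PySem.Int.mod x 4294967296).toNat / 4096 % 4096 : Nat) : Int) := by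
  rw [PySem.Int.mod_eq_emod_of_pos (show (0:Int) < 4294967296 by norm_num)]
  cases x with
  | ofNat a =>
    have hs : (Int.ofNat a) >>> (12:Nat) = Int.ofNat (a >>> 12) := rfl
    rw [hs]
    have hb : PySem.Int.band (Int.ofNat (a >>> 12)) 4095 = (((a >>> 12) &&& 4095 : Nat) : Int) := by
      unfold PySem.Int.band
      rw [if_pos (show (0:Int) ≤ Int.ofNat (a >>> 12) from Int.natCast_nonneg _),
        if_pos (by norm_num : (0:Int) ≤ 4095)]
      rfl
    rw [hb, Nat.shiftRight_eq_div_pow,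
      show (4095 : Nat) = 2 ^ 12 - 1 from rfl, Nat.and_two_pow_sub_one_eq_mod]
    norm_num
    omega
  | negSucc m =>
    have hs : (Int.negSucc m) >>> (12:Nat) = Int.negSucc (m >>> 12) := rfl
    rw [hs]
    have hb : PySem.Int.band (Int.negSucc (m >>> 12)) 4095 = (((4095 - (4095 &&& (m >>> 12)) : Nat) : Nat) : Int) := by
      have h3 : (-Int.negSucc (m >>> 12) - (1:Int)).toNat = m >>> 12 := by
        rw [Int.negSucc_eq]; omega
      unfold PySem.Int.band
      have hneg : ¬ (0:Int) ≤ Int.negSucc (m >>> 12) := by rw [Int.negSucc_eq]; omega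
      rw [if_neg hneg, if_pos (by norm_num : (0:Int) ≤ 4095), h3]
      rfl
    rw [hb, Nat.and_comm, Nat.shiftRight_eq_div_pow,
      show (4095 : Nat) = 2 ^ 12 - 1 from rfl, Nat.and_two_pow_sub_one_eq_mod, Int.negSucc_eq]
    norm_num
    omega

lemma pvBr_5_11 (x : Int) : PySem.Int.band (x >>> (5:Nat)) 2047 = (((PySem.Int.mod x 4294967296).toNat / 32 % 2048 : Nat) : Int) := by
  rw [PySem.Int.mod_eq_emod_of_pos (show (0:Int) < 4294967296 by norm_num)]
  cases x with
  | ofNat a =>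
    have hs : (Int.ofNat a) >>> (5:Nat) = Int.ofNat (a >>> 5) := rfl
    rw [hs]
    have hb : PySem.Int.band (Int.ofNat (a >>> 5)) 2047 = (((a >>> 5) &&& 2047 : Nat) : Int) := by
      unfold PySem.Int.band
      rw [if_pos (show (0:Int) ≤ Int.ofNat (a >>> 5) from Int.natCast_nonneg _),
        if_pos (by norm_num : (0:Int) ≤ 2047)]
      rfl
    rw [hb, Nat.shiftRight_eq_div_pow,
      show (2047 : Nat) = 2 ^ 11 - 1 from rfl, Nat.and_two_pow_sub_one_eq_mod]
    norm_num
    omega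
  | negSucc m =>
    have hs : (Int.negSucc m) >>> (5:Nat) = Int.negSucc (m >>> 5) := rfl
    rw [hs]
    have hb : PySem.Int.band (Int.negSucc (m >>> 5)) 2047 = (((2047 - (2047 &&& (m >>> 5)) : Nat) : Nat) : Int) := by
      have h3 : (-Int.negSucc (m >>> 5) - (1:Int)).toNat = m >>> 5 := by
        rw [Int.negSucc_eq]; omega
      unfold PySem.Int.band
      have hneg : ¬ (0:Int) ≤ Int.negSucc (m >>> 5) := by rw [Int.negSucc_eq]; omega
      rw [if_neg hneg, if_pos (by norm_num : (0:Int) ≤ 2047), h3]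
      rfl
    rw [hb, Nat.and_comm, Nat.shiftRight_eq_div_pow,
      show (2047 : Nat) = 2 ^ 11 - 1 from rfl, Nat.and_two_pow_sub_one_eq_mod, Int.negSucc_eq]
    norm_num
    omega

lemma pvBr_11_6 (x : Int) : PySem.Int.band (x >>> (11:Nat)) 63 = (((PySem.Int.mod x 4294967296).toNat / 2048 % 64 : Nat) : Int) := by
  rw [PySem.Int.mod_eq_emod_of_pos (show (0:Int) < 4294967296 by norm_num)]
  cases x with
  | ofNat a =>
    have hs : (Int.ofNat a) >>> (11:Nat) = Int.ofNat (a >>> 11) := rfl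
    rw [hs]
    have hb : PySem.Int.band (Int.ofNat (a >>> 11)) 63 = (((a >>> 11) &&& 63 : Nat) : Int) := by
      unfold PySem.Int.band
      rw [if_pos (show (0:Int) ≤ Int.ofNat (a >>> 11) from Int.natCast_nonneg _),
        if_pos (by norm_num : (0:Int) ≤ 63)]
      rfl
    rw [hb, Nat.shiftRight_eq_div_pow,
      show (63 : Nat) = 2 ^ 6 - 1 from rfl, Nat.and_two_pow_sub_one_eq_mod]
    norm_num
    omega
  | negSucc m =>
    have hs : (Int.negSucc m) >>> (11:Nat) = Int.negSucc (m >>> 11) := rfl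
    rw [hs]
    have hb : PySem.Int.band (Int.negSucc (m >>> 11)) 63 = (((63 - (63 &&& (m >>> 11)) : Nat) : Nat) : Int) := by
      have h3 : (-Int.negSucc (m >>> 11) - (1:Int)).toNat = m >>> 11 := by
        rw [Int.negSucc_eq]; omega
      unfold PySem.Int.band
      have hneg : ¬ (0:Int) ≤ Int.negSucc (m >>> 11) := by rw [Int.negSucc_eq]; omega
      rw [if_neg hneg, if_pos (by norm_num : (0:Int) ≤ 63), h3]
      rfl
    rw [hb, Nat.and_comm, Nat.shiftRight_eq_div_pow,
      show (63 : Nat) = 2 ^ 6 - 1 from rfl, Nat.and_two_pow_sub_one_eq_mod, Int.negSucc_eq]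
    norm_num
    omega

lemma pvBr_5_6 (x : Int) : PySem.Int.band (x >>> (5:Nat)) 63 = (((PySem.Int.mod x 4294967296).toNat / 32 % 64 : Nat) : Int) := by
  rw [PySem.Int.mod_eq_emod_of_pos (show (0:Int) < 4294967296 by norm_num)]
  cases x with
  | ofNat a =>
    have hs : (Int.ofNat a) >>> (5:Nat) = Int.ofNat (a >>> 5) := rfl
    rw [hs]
    have hb : PySem.Int.band (Int.ofNat (a >>> 5)) 63 = (((a >>> 5) &&& 63 : Nat) : Int) := by
      unfold PySem.Int.band
      rw [if_pos (show (0:Int) ≤ Int.ofNat (a >>> 5) from Int.natCast_nonneg _),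
        if_pos (by norm_num : (0:Int) ≤ 63)]
      rfl
    rw [hb, Nat.shiftRight_eq_div_pow,
      show (63 : Nat) = 2 ^ 6 - 1 from rfl, Nat.and_two_pow_sub_one_eq_mod]
    norm_num
    omega
  | negSucc m =>
    have hs : (Int.negSucc m) >>> (5:Nat) = Int.negSucc (m >>> 5) := rfl
    rw [hs]
    have hb : PySem.Int.band (Int.negSucc (m >>> 5)) 63 = (((63 - (63 &&& (m >>> 5)) : Nat) : Nat) : Int) := by
      have h3 : (-Int.negSucc (m >>> 5) - (1:Int)).toNat = m >>> 5 := by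
        rw [Int.negSucc_eq]; omega
      unfold PySem.Int.band
      have hneg : ¬ (0:Int) ≤ Int.negSucc (m >>> 5) := by rw [Int.negSucc_eq]; omega
      rw [if_neg hneg, if_pos (by norm_num : (0:Int) ≤ 63), h3]
      rfl
    rw [hb, Nat.and_comm, Nat.shiftRight_eq_div_pow,
      show (63 : Nat) = 2 ^ 6 - 1 from rfl, Nat.and_two_pow_sub_one_eq_mod, Int.negSucc_eq]
    norm_num
    omega

lemma pvBr_0_12 (x : Int) : PySem.Int.band x 4095 = (((PySem.Int.mod x 4294967296).toNat % 4096 : Nat) : Int) := by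
  rw [PySem.Int.mod_eq_emod_of_pos (show (0:Int) < 4294967296 by norm_num)]
  cases x with
  | ofNat a =>
    have hb : PySem.Int.band (Int.ofNat a) 4095 = ((a &&& 4095 : Nat) : Int) := by
      unfold PySem.Int.band
      rw [if_pos (show (0:Int) ≤ Int.ofNat a from Int.natCast_nonneg _),
        if_pos (by norm_num : (0:Int) ≤ 4095)]
      rfl
    rw [hb, show (4095 : Nat) = 2 ^ 12 - 1 from rfl, Nat.and_two_pow_sub_one_eq_mod]
    norm_num
    omega
  | negSucc m =>
    have hb : PySem.Int.band (Int.negSucc m) 4095 = (((4095 - (4095 &&& m) : Nat) : Nat) : Int) := by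
      have h3 : (-Int.negSucc m - (1:Int)).toNat = m := by
        rw [Int.negSucc_eq]; omega
      unfold PySem.Int.band
      have hneg : ¬ (0:Int) ≤ Int.negSucc m := by rw [Int.negSucc_eq]; omega
      rw [if_neg hneg, if_pos (by norm_num : (0:Int) ≤ 4095), h3]
      rfl
    rw [hb, Nat.and_comm, show (4095 : Nat) = 2 ^ 12 - 1 from rfl,
      Nat.and_two_pow_sub_one_eq_mod, Int.negSucc_eq]
    norm_num
    omega

lemma pvBr_0_21 (x : Int) : PySem.Int.band x 2097151 = (((PySem.Int.mod x 4294967296).toNat % 2097152 : Nat) : Int) := by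
  rw [PySem.Int.mod_eq_emod_of_pos (show (0:Int) < 4294967296 by norm_num)]
  cases x with
  | ofNat a =>
    have hb : PySem.Int.band (Int.ofNat a) 2097151 = ((a &&& 2097151 : Nat) : Int) := by
      unfold PySem.Int.band
      rw [if_pos (show (0:Int) ≤ Int.ofNat a from Int.natCast_nonneg _),
        if_pos (by norm_num : (0:Int) ≤ 2097151)]
      rfl
    rw [hb, show (2097151 : Nat) = 2 ^ 21 - 1 from rfl, Nat.and_two_pow_sub_one_eq_mod]
    norm_num
    omega
  | negSucc m =>
    have hb : PySem.Int.band (Int.negSucc m) 2097151 = (((2097151 - (2097151 &&& m) : Nat) : Nat) : Int) := by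
      have h3 : (-Int.negSucc m - (1:Int)).toNat = m := by
        rw [Int.negSucc_eq]; omega
      unfold PySem.Int.band
      have hneg : ¬ (0:Int) ≤ Int.negSucc m := by rw [Int.negSucc_eq]; omega
      rw [if_neg hneg, if_pos (by norm_num : (0:Int) ≤ 2097151), h3]
      rfl
    rw [hb, Nat.and_comm, show (2097151 : Nat) = 2 ^ 21 - 1 from rfl,
      Nat.and_two_pow_sub_one_eq_mod, Int.negSucc_eq]
    norm_num
    omega

lemma pvBr_0_6 (x : Int) : PySem.Int.band x 63 = (((PySem.Int.mod x 4294967296).toNat % 64 : Nat) : Int) := by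
  rw [PySem.Int.mod_eq_emod_of_pos (show (0:Int) < 4294967296 by norm_num)]
  cases x with
  | ofNat a =>
    have hb : PySem.Int.band (Int.ofNat a) 63 = ((a &&& 63 : Nat) : Int) := by
      unfold PySem.Int.band
      rw [if_pos (show (0:Int) ≤ Int.ofNat a from Int.natCast_nonneg _),
        if_pos (by norm_num : (0:Int) ≤ 63)]
      rfl
    rw [hb, show (63 : Nat) = 2 ^ 6 - 1 from rfl, Nat.and_two_pow_sub_one_eq_mod]
    norm_num
    omega
  | negSucc m =>
    have hb : PySem.Int.band (Int.negSucc m) 63 = (((63 - (63 &&& m) : Nat) : Nat) : Int) := by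
      have h3 : (-Int.negSucc m - (1:Int)).toNat = m := by
        rw [Int.negSucc_eq]; omega
      unfold PySem.Int.band
      have hneg : ¬ (0:Int) ≤ Int.negSucc m := by rw [Int.negSucc_eq]; omega
      rw [if_neg hneg, if_pos (by norm_num : (0:Int) ≤ 63), h3]
      rfl
    rw [hb, Nat.and_comm, show (63 : Nat) = 2 ^ 6 - 1 from rfl,
      Nat.and_two_pow_sub_one_eq_mod, Int.negSucc_eq]
    norm_num
    omega

lemma pvBr_0_7 (x : Int) : PySem.Int.band x 127 = (((PySem.Int.mod x 4294967296).toNat % 128 : Nat) : Int) := by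
  rw [PySem.Int.mod_eq_emod_of_pos (show (0:Int) < 4294967296 by norm_num)]
  cases x with
  | ofNat a =>
    have hb : PySem.Int.band (Int.ofNat a) 127 = ((a &&& 127 : Nat) : Int) := by
      unfold PySem.Int.band
      rw [if_pos (show (0:Int) ≤ Int.ofNat a from Int.natCast_nonneg _),
        if_pos (by norm_num : (0:Int) ≤ 127)]
      rfl
    rw [hb, show (127 : Nat) = 2 ^ 7 - 1 from rfl, Nat.and_two_pow_sub_one_eq_mod]
    norm_num
    omega
  | negSucc m =>
    have hb : PySem.Int.band (Int.negSucc m) 127 = (((127 - (127 &&& m) : Nat) : Nat) : Int) := by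
      have h3 : (-Int.negSucc m - (1:Int)).toNat = m := by
        rw [Int.negSucc_eq]; omega
      unfold PySem.Int.band
      have hneg : ¬ (0:Int) ≤ Int.negSucc m := by rw [Int.negSucc_eq]; omega
      rw [if_neg hneg, if_pos (by norm_num : (0:Int) ≤ 127), h3]
      rfl
    rw [hb, Nat.and_comm, show (127 : Nat) = 2 ^ 7 - 1 from rfl,
      Nat.and_two_pow_sub_one_eq_mod, Int.negSucc_eq]
    norm_num
    omega

-- B's per-element decode equals A's
lemma one_eq (x : Int) :
    pvAone x
    = (let bits := pvBits32 x
       let opcode := pvField bits 26 32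
       match pvSpecs.lookup opcode with
       | none => "UNKNOWN_OPCODE " ++ PySem.Int.toStr opcode
       | some (name, fields) =>
           name ++ " " ++ PySem.Str.join ", "
             (fields.map (fun f => f.1 ++ "=" ++ PySem.Int.toStr (pvField bits f.2.1 f.2.2)))) := by
  have hop : pvField (pvBits32 x) 26 32 = PySem.Int.band (x >>> (26:Nat)) 63 := by
    have h := pvField_spec x 26 32 (by norm_num) (by norm_num)
    norm_num at h
    rw [h, pvBr_26_6, PySem.Int.mod_eq_emod_of_pos (show (0:Int) < 4294967296 by norm_num)]
    omega
  have hB12 : pvField (pvBits32 x) 12 24 = PySem.Int.band (x >>> (12:Nat)) 4095 := by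
    have h := pvField_spec x 12 24 (by norm_num) (by norm_num)
    norm_num at h
    rw [h, pvBr_12_12, PySem.Int.mod_eq_emod_of_pos (show (0:Int) < 4294967296 by norm_num)]
    omega
  have hB5 : pvField (pvBits32 x) 5 16 = PySem.Int.band (x >>> (5:Nat)) 2047 := by
    have h := pvField_spec x 5 16 (by norm_num) (by norm_num)
    norm_num at h
    rw [h, pvBr_5_11, PySem.Int.mod_eq_emod_of_pos (show (0:Int) < 4294967296 by norm_num)]
    omega
  have hB11 : pvField (pvBits32 x) 11 17 = PySem.Int.band (x >>> (11:Nat)) 63 := by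
    have h := pvField_spec x 11 17 (by norm_num) (by norm_num)
    norm_num at h
    rw [h, pvBr_11_6, PySem.Int.mod_eq_emod_of_pos (show (0:Int) < 4294967296 by norm_num)]
    omega
  have hC5 : pvField (pvBits32 x) 5 11 = PySem.Int.band (x >>> (5:Nat)) 63 := by
    have h := pvField_spec x 5 11 (by norm_num) (by norm_num)
    norm_num at h
    rw [h, pvBr_5_6, PySem.Int.mod_eq_emod_of_pos (show (0:Int) < 4294967296 by norm_num)]
    omega
  have hC12 : pvField (pvBits32 x) 0 12 = PySem.Int.band x 4095 := by
    have h := pvField_spec x 0 12 (by norm_num) (by norm_num)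
    norm_num at h
    rw [h, pvBr_0_12, PySem.Int.mod_eq_emod_of_pos (show (0:Int) < 4294967296 by norm_num)]
    omega
  have hC21 : pvField (pvBits32 x) 0 21 = PySem.Int.band x 2097151 := by
    have h := pvField_spec x 0 21 (by norm_num) (by norm_num)
    norm_num at h
    rw [h, pvBr_0_21, PySem.Int.mod_eq_emod_of_pos (show (0:Int) < 4294967296 by norm_num)]
    omega
  have hD6 : pvField (pvBits32 x) 0 6 = PySem.Int.band x 63 := by
    have h := pvField_spec x 0 6 (by norm_num) (by norm_num)
    norm_num at h
    rw [h, pvBr_0_6, PySem.Int.mod_eq_emod_of_pos (show (0:Int) < 4294967296 by norm_num)]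
    omega
  have hC7 : pvField (pvBits32 x) 0 7 = PySem.Int.band x 127 := by
    have h := pvField_spec x 0 7 (by norm_num) (by norm_num)
    norm_num at h
    rw [h, pvBr_0_7, PySem.Int.mod_eq_emod_of_pos (show (0:Int) < 4294967296 by norm_num)]
    omega
  show pvAone x
      = (match pvSpecs.lookup (pvField (pvBits32 x) 26 32) with
         | none => "UNKNOWN_OPCODE " ++ PySem.Int.toStr (pvField (pvBits32 x) 26 32)
         | some (name, fields) =>
             name ++ " " ++ PySem.Str.join ", "
               (fields.map (fun f => f.1 ++ "=" ++ PySem.Int.toStr (pvField (pvBits32 x) f.2.1 f.2.2))))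
  rw [hop]
  unfold pvAone pvSpecs
  set opcode := PySem.Int.band (x >>> (26:Nat)) 0x3F with hopdef
  by_cases h26 : opcode = 26
  · simp only [List.lookup, h26]
    simp only [show ((26 : Int) == 26) = true from rfl]
    simp only [List.map_cons, List.map_nil]
    rw [hB12, hC12, ← h26]
    apply String.toList_injective
    simp [PySem.Str.join, PySem.Chars.join, List.intercalate]
  · have e26 : (opcode == 26) = false := by simpa using h26
    by_cases h14 : opcode = 14
    · simp only [List.lookup, h14]
      simp only [show ((14 : Int) == 26) = false from rfl, show ((14 : Int) == 14) = true from rfl]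
      simp only [List.map_cons, List.map_nil]
      rw [hB5, hC21, ← h14]
      apply String.toList_injective
      simp [PySem.Str.join, PySem.Chars.join, List.intercalate, if_neg h26]
    · have e14 : (opcode == 14) = false := by simpa using h14
      by_cases h7 : opcode = 7
      · simp only [List.lookup, h7]
        simp only [show ((7 : Int) == 26) = false from rfl, show ((7 : Int) == 14) = false from rfl,
          show ((7 : Int) == 7) = true from rfl]
        simp only [List.map_cons, List.map_nil]
        rw [hB11, hC5, hD6, ← h7]
        apply String.toList_injective
        simp [PySem.Str.join, PySem.Chars.join, List.intercalate, if_neg h26, if_neg h14]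
      · have e7 : (opcode == 7) = false := by simpa using h7
        by_cases h6 : opcode = 6
        · simp only [List.lookup, h6]
          simp only [show ((6 : Int) == 26) = false from rfl, show ((6 : Int) == 14) = false from rfl,
            show ((6 : Int) == 7) = false from rfl, show ((6 : Int) == 6) = true from rfl]
          simp only [List.map_cons, List.map_nil]
          rw [hB12, hC7, ← h6]
          apply String.toList_injective
          simp [PySem.Str.join, PySem.Chars.join, List.intercalate, if_neg h26, if_neg h14, if_neg h7]
        · have e6 : (opcode == 6) = false := by simpa using h6
          simp only [List.lookup, if_neg h26, if_neg h14, if_neg h7, if_neg h6, e26, e14, e7, e6]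

-- ===== VERDICT (by name: the statement is the Claim_ definition above) =====
theorem decode_instructions_spec : Claim_equal_decode_instructions := by
  intro instructions _
  unfold Spec_decode_instructions decode_instructions decode_instructions_alt
  rw [a_eq_map]
  simp only [List.nil_append]
  exact List.map_congr_left (fun x _ => one_eq x)
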